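-- pv_equiv track=rewrite | github.com/Masudali23/PX4-Iris-Drone-Path-Planning-CV | Path_planning/Scripts/Path_Planning_CSV.py | get_direction_changes
-- ===== SOURCE A (Python) =====
-- def get_direction_changes(path):
--     """Function to get the points where the line changes direction, including U-turns."""
--     if len(path) < 2:
--         return []
--
--     direction_changes = [path[0]]  # Starting point is always included
--
--     for i in range(1, len(path) - 1):
--         x1, y1 = path[i - 1]
--         x2, y2 = path[i]
--         x3, y3 = path[i + 1]
--
--         dx1, dy1 = x2 - x1, y2 - y1  # Direction from (x1, y1) to (x2, y2)
--         dx2, dy2 = x3 - x2, y3 - y2  # Direction from (x2, y2) to (x3, y3)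
--
--         if (dx1 != dx2 or dy1 != dy2) or (dx1 == -dx2 and dy1 == -dy2):
--             direction_changes.append(path[i])
--
--     direction_changes.append(path[-1])  # Add the final point of the path
--
--     return direction_changes
-- ===== SOURCE B (Python) =====
-- def get_direction_changes(path):
--     """Direction-change points via run-length encoding of the consecutive direction vectors:
--     phase 1 compresses the delta sequence into (delta, run_length) pairs, phase 2 rebuilds the
--     kept points run by run (run boundaries are kept, interiors of a moving run are dropped,
--     every point of a stationary run is kept)."""
--     if len(path) < 2:
--         return []
--     # Phase 1: run-length encode the direction vectors.
--     runs = []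
--     cur = None
--     for a, b in zip(path, path[1:]):
--         d = (b[0] - a[0], b[1] - a[1])
--         if cur is not None and cur[0] == d:
--             cur = (d, cur[1] + 1)
--         else:
--             if cur is not None:
--                 runs.append(cur)
--             cur = (d, 1)
--     runs.append(cur)
--     # Phase 2: rebuild the kept points run by run.
--     out = [path[0]]
--     tail = path[1:]
--     for d, length in runs:
--         if d == (0, 0):
--             out.extend(tail[:length - 1])
--         rest = tail[length:]
--         if rest:
--             out.append(tail[length - 1])
--         tail = rest
--     out.append(path[-1])
--     return out
-- ===== Notes on version B (the rewrite author's own statement) =====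
-- stated objective: alternative
-- what changed: Replaces A's single triple-indexed scan by a two-phase run-length algorithm: phase 1 compresses the consecutive direction vectors into (delta, run_length) pairs, phase 2 rebuilds the answer run by run (keep run boundaries and the endpoints, keep every point of a zero-delta run, drop interiors of moving runs) without ever re-testing the per-point condition.
import Mathlib
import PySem

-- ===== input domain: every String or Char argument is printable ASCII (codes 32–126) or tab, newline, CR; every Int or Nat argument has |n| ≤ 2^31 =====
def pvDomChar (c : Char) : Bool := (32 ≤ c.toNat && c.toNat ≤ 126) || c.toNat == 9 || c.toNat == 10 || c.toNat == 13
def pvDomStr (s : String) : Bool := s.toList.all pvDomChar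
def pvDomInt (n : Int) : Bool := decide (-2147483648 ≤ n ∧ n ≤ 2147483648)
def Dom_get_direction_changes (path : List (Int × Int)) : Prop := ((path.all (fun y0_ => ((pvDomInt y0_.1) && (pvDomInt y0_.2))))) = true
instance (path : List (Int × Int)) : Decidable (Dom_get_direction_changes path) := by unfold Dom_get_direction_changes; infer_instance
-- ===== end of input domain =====

-- B replaces A's triple-indexed per-point scan by a two-phase run-length algorithm (encode the
-- direction vectors into runs, then rebuild the kept points run by run); same cost, different algorithm.

-- ===== PORT A =====
-- literal transliteration of A's index loop; pyGetD's default is never read (indices 0, i-1, i, i+1, -1 are all in range)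
def get_direction_changes (path : List (Int × Int)) : List (Int × Int) :=
  if path.length < 2 then [] else
  let init : List (Int × Int) := [PySem.List.pyGetD path 0 (0, 0)]
  let dc := (PySem.List.pyRange 1 ((path.length : Int) - 1) 1).foldl (fun acc i =>
    let p1 := PySem.List.pyGetD path (i - 1) (0, 0)
    let p2 := PySem.List.pyGetD path i (0, 0)
    let p3 := PySem.List.pyGetD path (i + 1) (0, 0)
    let dx1 := p2.1 - p1.1; let dy1 := p2.2 - p1.2
    let dx2 := p3.1 - p2.1; let dy2 := p3.2 - p2.2
    if (dx1 ≠ dx2 ∨ dy1 ≠ dy2) ∨ (dx1 = -dx2 ∧ dy1 = -dy2) then acc ++ [p2] else acc) init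
  dc ++ [PySem.List.pyGetD path (-1) (0, 0)]

-- ===== PORT B =====
-- phase-1 step of Source B's first loop: carry the current run in `cur`, flush it into `runs` on a change
-- (run lengths are Python ints that only ever grow from 1 by +1, so they are carried as Nat)
def pvGroupStep (s : List ((Int × Int) × Nat) × Option ((Int × Int) × Nat)) (d : Int × Int) :
    List ((Int × Int) × Nat) × Option ((Int × Int) × Nat) :=
  match s.2 with
  | some (d', k) => if d' = d then (s.1, some (d, k + 1)) else (s.1 ++ [(d', k)], some (d, 1))
  | none => (s.1, some (d, 1))

-- phase-2 step of Source B's second loop: tail[:length-1] / tail[length:] are nonnegative Python slices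
-- (length ≥ 1), so List.take/drop are exact; tail[length-1] is a nonnegative in-range index (getD)
def pvEmitStep (s : List (Int × Int) × List (Int × Int)) (r : (Int × Int) × Nat) :
    List (Int × Int) × List (Int × Int) :=
  let out1 := if r.1 = ((0 : Int), (0 : Int)) then s.1 ++ s.2.take (r.2 - 1) else s.1
  let rest := s.2.drop r.2
  let out2 := if rest ≠ [] then out1 ++ [s.2.getD (r.2 - 1) (0, 0)] else out1
  (out2, rest)

def get_direction_changes_alt (path : List (Int × Int)) : List (Int × Int) :=
  if path.length < 2 then [] else
  let tail := PySem.List.slice path (some 1) none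
  let st := (List.zipWith (fun a b => (b.1 - a.1, b.2 - a.2)) path tail).foldl pvGroupStep ([], none)
  let runs := match st.2 with | some c => st.1 ++ [c] | none => st.1
  let res := runs.foldl pvEmitStep ([PySem.List.pyGetD path 0 (0, 0)], tail)
  res.1 ++ [PySem.List.pyGetD path (-1) (0, 0)]

-- ===== PRECONDITION & SPEC =====
def Spec_get_direction_changes (path : List (Int × Int)) (out : List (Int × Int)) : Prop := out = get_direction_changes_alt path
instance (path : List (Int × Int)) (out : List (Int × Int)) : Decidable (Spec_get_direction_changes path out) := by unfold Spec_get_direction_changes; infer_instance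

-- ===== CLAIM (what is proved, stated in full; the proofs are below) =====
def Claim_equal_get_direction_changes : Prop := ∀ (path : List (Int × Int)), Dom_get_direction_changes path → Spec_get_direction_changes path (get_direction_changes path)

-- ===== LEMMAS AND PROOFS =====

-- common reference: the interior points both programs keep (condition in B's simplified form)
def pvCore : (Int × Int) → (Int × Int) → List (Int × Int) → List (Int × Int)
  | _, _, [] => []
  | a, b, c :: rest =>
    if ((b.1 - a.1, b.2 - a.2) : Int × Int) ≠ (c.1 - b.1, c.2 - b.2) ∨ ((b.1 - a.1, b.2 - a.2) : Int × Int) = (0, 0)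
    then b :: pvCore b c rest else pvCore b c rest

-- A's selection condition is equivalent to the reference condition
lemma pvCondIff (a b c : Int × Int) :
    (((b.1 - a.1 ≠ c.1 - b.1 ∨ b.2 - a.2 ≠ c.2 - b.2) ∨ (b.1 - a.1 = -(c.1 - b.1) ∧ b.2 - a.2 = -(c.2 - b.2))))
    ↔ (((b.1 - a.1, b.2 - a.2) : Int × Int) ≠ (c.1 - b.1, c.2 - b.2) ∨ ((b.1 - a.1, b.2 - a.2) : Int × Int) = (0, 0)) := by
  simp only [ne_eq, Prod.mk.injEq, not_and]
  omega

lemma pvGetD_of_drop (path l : List (Int × Int)) (k : Nat) (x : Int × Int) (d : Int × Int)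
    (h : path.drop k = x :: l) : PySem.List.pyGetD path (k : Int) d = x := by
  have hx : path[k]? = some x := by
    have := List.getElem?_drop (xs := path) (i := k) (j := 0)
    rw [h] at this; simpa using this.symm
  simp [PySem.List.pyGetD_natCast, List.getD, hx]

-- A's loop computes pvCore
lemma loopA_eq (path : List (Int × Int)) :
    ∀ (rest : List (Int × Int)) (a b : Int × Int) (k : Nat) (acc : List (Int × Int)),
    path.drop k = a :: b :: rest →
    (PySem.List.pyRange ((k : Int) + 1) ((path.length : Int) - 1) 1).foldl (fun acc i =>
      let p1 := PySem.List.pyGetD path (i - 1) (0, 0)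
      let p2 := PySem.List.pyGetD path i (0, 0)
      let p3 := PySem.List.pyGetD path (i + 1) (0, 0)
      let dx1 := p2.1 - p1.1; let dy1 := p2.2 - p1.2
      let dx2 := p3.1 - p2.1; let dy2 := p3.2 - p2.2
      if (dx1 ≠ dx2 ∨ dy1 ≠ dy2) ∨ (dx1 = -dx2 ∧ dy1 = -dy2) then acc ++ [p2] else acc) acc
    = acc ++ pvCore a b rest := by
  intro rest
  induction rest with
  | nil =>
    intro a b k acc h
    have hlen : path.length = k + 2 := by
      have := congrArg List.length h
      simp at this; omega
    rw [PySem.List.pyRange_one_eq_nil (by simp [hlen]; omega)]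
    simp [pvCore]
  | cons c rest ih =>
    intro a b k acc h
    have hlen : path.length = k + 3 + rest.length := by
      have := congrArg List.length h
      simp at this; omega
    have hdk1 : path.drop (k + 1) = b :: c :: rest := by
      have : path.drop (k+1) = (path.drop k).drop 1 := by rw [List.drop_drop]
      rw [this, h]; rfl
    have hdk2 : path.drop (k + 2) = c :: rest := by
      have : path.drop (k+2) = (path.drop (k+1)).drop 1 := by rw [List.drop_drop]
      rw [this, hdk1]; rfl
    have ha : PySem.List.pyGetD path (k : Int) (0, 0) = a := pvGetD_of_drop _ _ _ _ _ h
    have hb : PySem.List.pyGetD path ((k : Int) + 1) (0, 0) = b := by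
      have := pvGetD_of_drop _ _ _ _ (0,0) hdk1
      push_cast at this; exact this
    have hc : PySem.List.pyGetD path ((k : Int) + 1 + 1) (0, 0) = c := by
      have := pvGetD_of_drop _ _ _ _ (0,0) hdk2
      push_cast at this
      rw [show (k : Int) + 1 + 1 = (k : Int) + 2 by ring]; exact this
    rw [PySem.List.pyRange_one_cons (by omega : ((k : Int) + 1) < (path.length : Int) - 1)]
    simp only [List.foldl_cons]
    rw [show ((k : Int) + 1) - 1 = (k : Int) by ring, ha, hb, hc]
    have ihk := ih b c (k + 1)
    push_cast at ihk
    by_cases hcond : (b.1 - a.1 ≠ c.1 - b.1 ∨ b.2 - a.2 ≠ c.2 - b.2) ∨ (b.1 - a.1 = -(c.1 - b.1) ∧ b.2 - a.2 = -(c.2 - b.2))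
    · rw [if_pos hcond, ihk (acc ++ [b]) hdk1]
      rw [pvCore, if_pos ((pvCondIff a b c).mp hcond)]
      simp
    · rw [if_neg hcond, ihk acc hdk1]
      rw [pvCore, if_neg (fun hh => hcond ((pvCondIff a b c).mpr hh))]

-- reference run-length encoding (grouping from the right)
def pvRuns : List (Int × Int) → List ((Int × Int) × Nat)
  | [] => []
  | d :: ds =>
    match pvRuns ds with
    | (d', k) :: rs => if d = d' then (d, k + 1) :: rs else (d, 1) :: (d', k) :: rs
    | [] => [(d, 1)]

lemma pvRuns_head (ds : List (Int × Int)) (d : Int × Int) :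
    ∃ k rs, pvRuns (d :: ds) = (d, k + 1) :: rs := by
  show ∃ k rs, (match pvRuns ds with
    | (d', k) :: rs => if d = d' then (d, k + 1) :: rs else (d, 1) :: (d', k) :: rs
    | [] => [(d, 1)]) = (d, k + 1) :: rs
  cases h : pvRuns ds with
  | nil => exact ⟨0, [], rfl⟩
  | cons p rs =>
    obtain ⟨d', k⟩ := p
    by_cases hd : d = d'
    · exact ⟨k, rs, by simp [hd]⟩
    · exact ⟨0, (d', k) :: rs, by simp [hd]⟩

-- left-grouping with a carried current run (what Source B's phase-1 loop maintains)
def pvGC : (Int × Int) × Nat → List (Int × Int) → List ((Int × Int) × Nat)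
  | c, [] => [c]
  | (d, k), e :: ds => if d = e then pvGC (d, k + 1) ds else (d, k) :: pvGC (e, 1) ds

def pvFlush (s : List ((Int × Int) × Nat) × Option ((Int × Int) × Nat)) : List ((Int × Int) × Nat) :=
  match s.2 with | some c => s.1 ++ [c] | none => s.1

lemma foldl_group_flush :
    ∀ (ds : List (Int × Int)) (acc : List ((Int × Int) × Nat)) (d : Int × Int) (k : Nat),
    pvFlush (ds.foldl pvGroupStep (acc, some (d, k))) = acc ++ pvGC (d, k) ds := by
  intro ds
  induction ds with
  | nil => intro acc d k; simp [pvFlush, pvGC]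
  | cons e ds ih =>
    intro acc d k
    simp only [List.foldl_cons]
    by_cases hd : d = e
    · rw [show pvGroupStep (acc, some (d, k)) e = (acc, some (e, k + 1)) by
        simp [pvGroupStep, hd]]
      rw [ih, pvGC, hd, if_pos rfl]
    · rw [show pvGroupStep (acc, some (d, k)) e = (acc ++ [(d, k)], some (e, 1)) by
        simp [pvGroupStep, hd]]
      rw [ih, pvGC, if_neg hd]
      simp

def pvBump (m : Nat) : List ((Int × Int) × Nat) → List ((Int × Int) × Nat)
  | (x, j) :: rs => (x, j + m) :: rs
  | [] => []

lemma pvGC_pvRuns : ∀ (ds : List (Int × Int)) (d : Int × Int) (k : Nat),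
    pvGC (d, k + 1) ds = pvBump k (pvRuns (d :: ds)) := by
  intro ds
  induction ds with
  | nil => intro d k; simp [pvGC, pvRuns, pvBump, Nat.add_comm]
  | cons e ds ih =>
    intro d k
    obtain ⟨j, rs, hj⟩ := pvRuns_head ds e
    by_cases hd : d = e
    · rw [pvGC, if_pos hd, hd, ih e (k + 1), hj]
      have h2 : pvRuns (e :: e :: ds) = (e, j + 1 + 1) :: rs := by
        rw [pvRuns, hj]; simp
      rw [h2]
      simp [pvBump]
      omega
    · rw [pvGC, if_neg hd, ih e 0, hj]
      have h2 : pvRuns (d :: e :: ds) = (d, 1) :: (e, j + 1) :: rs := by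
        rw [pvRuns, hj]; simp [hd]
      rw [h2]
      simp [pvBump]
      omega

-- reference reconstruction (what Source B's phase-2 loop emits for the interior points)
def pvRecon : List ((Int × Int) × Nat) → List (Int × Int) → List (Int × Int)
  | [], _ => []
  | (d, L) :: rs, tail =>
      (if d = ((0 : Int), (0 : Int)) then tail.take (L - 1) else []) ++
      (if tail.drop L ≠ [] then [tail.getD (L - 1) (0, 0)] else []) ++
      pvRecon rs (tail.drop L)

lemma foldl_emit (runs : List ((Int × Int) × Nat)) :
    ∀ (out tail : List (Int × Int)),
    (runs.foldl pvEmitStep (out, tail)).1 = out ++ pvRecon runs tail := by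
  induction runs with
  | nil => intro out tail; simp [pvRecon]
  | cons r rs ih =>
    intro out tail
    obtain ⟨d, L⟩ := r
    simp only [List.foldl_cons]
    rw [show pvEmitStep (out, tail) (d, L) =
      ((if d = ((0 : Int), (0 : Int)) then out ++ tail.take (L - 1) else out) ++
        (if tail.drop L ≠ [] then [tail.getD (L - 1) (0, 0)] else []), tail.drop L) by
      simp only [pvEmitStep]
      split_ifs <;> simp]
    rw [ih, pvRecon]
    split_ifs <;> simp

-- the run-length reconstruction computes pvCore
lemma recon_core : ∀ (t : List (Int × Int)) (a b : Int × Int),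
    pvRecon (pvRuns ((b.1 - a.1, b.2 - a.2) :: List.zipWith (fun x y => (y.1 - x.1, y.2 - x.2)) (b :: t) t)) (b :: t)
    = pvCore a b t := by
  intro t
  induction t with
  | nil =>
    intro a b
    simp [pvRuns, pvRecon, pvCore]
  | cons c r ih =>
    intro a b
    obtain ⟨k, rs, hk⟩ := pvRuns_head (List.zipWith (fun x y => (y.1 - x.1, y.2 - x.2)) (c :: r) r) (c.1 - b.1, c.2 - b.2)
    have ihbc := ih b c
    simp only [List.zipWith_cons_cons] at ihbc ⊢
    by_cases hd : ((b.1 - a.1, b.2 - a.2) : Int × Int) = (c.1 - b.1, c.2 - b.2)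
    · rw [pvCore, hd]
      have hruns : pvRuns ((c.1 - b.1, c.2 - b.2) :: (c.1 - b.1, c.2 - b.2) ::
          List.zipWith (fun x y => (y.1 - x.1, y.2 - x.2)) (c :: r) r)
          = ((c.1 - b.1, c.2 - b.2), k + 1 + 1) :: rs := by
        rw [pvRuns, hk]; simp
      rw [hk] at ihbc
      rw [pvRecon] at ihbc
      rw [hruns, pvRecon, ← ihbc]
      simp only [Nat.add_sub_cancel, List.take_succ_cons, List.drop_succ_cons, List.getD_cons_succ]
      by_cases hz : ((c.1 - b.1, c.2 - b.2) : Int × Int) = ((0 : Int), (0 : Int))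
      · simp [hz]
      · simp [hz]
    · have hruns : pvRuns ((b.1 - a.1, b.2 - a.2) :: (c.1 - b.1, c.2 - b.2) ::
          List.zipWith (fun x y => (y.1 - x.1, y.2 - x.2)) (c :: r) r)
          = ((b.1 - a.1, b.2 - a.2), 1) :: pvRuns ((c.1 - b.1, c.2 - b.2) ::
              List.zipWith (fun x y => (y.1 - x.1, y.2 - x.2)) (c :: r) r) := by
        rw [pvRuns, hk]; simp [hd]
      rw [hruns, pvRecon, pvCore, if_pos (Or.inl hd), ← ihbc]
      simp

-- ===== VERDICT (by name: the statement is the Claim_ definition above) =====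
theorem get_direction_changes_spec : Claim_equal_get_direction_changes := by
  intro path _
  unfold Spec_get_direction_changes
  match path with
  | [] => rfl
  | [a] => rfl
  | a :: b :: rest =>
    have hlen : ¬ (a :: b :: rest).length < 2 := by simp
    have hA := loopA_eq (a :: b :: rest) rest a b 0 [PySem.List.pyGetD (a :: b :: rest) 0 (0, 0)] (by simp)
    rw [show ((0:Nat):Int) + 1 = 1 by norm_num] at hA
    have htail : PySem.List.slice (a :: b :: rest) (some 1) none = b :: rest := by
      rw [PySem.List.slice_from_one]; rfl
    -- evaluate B: phase 1 is pvRuns, phase 2 is pvRecon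
    have hfold1 : ((b.1 - a.1, b.2 - a.2) :: List.zipWith (fun x y => ((y.1 - x.1 : Int), (y.2 - x.2 : Int))) (b :: rest) rest).foldl
        pvGroupStep ([], none)
        = (List.zipWith (fun x y => ((y.1 - x.1 : Int), (y.2 - x.2 : Int))) (b :: rest) rest).foldl
            pvGroupStep ([], some ((b.1 - a.1, b.2 - a.2), 1)) := by
      simp [pvGroupStep]
    have hruns0 := foldl_group_flush (List.zipWith (fun x y => ((y.1 - x.1 : Int), (y.2 - x.2 : Int))) (b :: rest) rest) [] (b.1 - a.1, b.2 - a.2) 1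
    have hgc := pvGC_pvRuns (List.zipWith (fun x y => ((y.1 - x.1 : Int), (y.2 - x.2 : Int))) (b :: rest) rest) (b.1 - a.1, b.2 - a.2) 0
    obtain ⟨k, rs, hk⟩ := pvRuns_head (List.zipWith (fun x y => ((y.1 - x.1 : Int), (y.2 - x.2 : Int))) (b :: rest) rest) (b.1 - a.1, b.2 - a.2)
    rw [hk] at hgc
    simp only [pvBump, Nat.add_zero] at hgc
    have hruns : pvFlush ((List.zipWith (fun x y => ((y.1 - x.1 : Int), (y.2 - x.2 : Int))) (b :: rest) rest).foldl
        pvGroupStep ([], some ((b.1 - a.1, b.2 - a.2), 1)))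
        = pvRuns ((b.1 - a.1, b.2 - a.2) :: List.zipWith (fun x y => ((y.1 - x.1 : Int), (y.2 - x.2 : Int))) (b :: rest) rest) := by
      rw [hruns0, hgc, hk]
      simp
    simp only [get_direction_changes, get_direction_changes_alt, if_neg hlen, htail]
    simp only [List.zipWith_cons_cons] at *
    rw [hA, hfold1]
    have := foldl_emit (pvFlush ((List.zipWith (fun x y => ((y.1 - x.1 : Int), (y.2 - x.2 : Int))) (b :: rest) rest).foldl
        pvGroupStep ([], some ((b.1 - a.1, b.2 - a.2), 1)))) [PySem.List.pyGetD (a :: b :: rest) 0 (0, 0)] (b :: rest)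
    rw [show (match ((List.zipWith (fun x y => ((y.1 - x.1 : Int), (y.2 - x.2 : Int))) (b :: rest) rest).foldl
        pvGroupStep ([], some ((b.1 - a.1, b.2 - a.2), 1))).2 with
        | some c => ((List.zipWith (fun x y => ((y.1 - x.1 : Int), (y.2 - x.2 : Int))) (b :: rest) rest).foldl
            pvGroupStep ([], some ((b.1 - a.1, b.2 - a.2), 1))).1 ++ [c]
        | none => ((List.zipWith (fun x y => ((y.1 - x.1 : Int), (y.2 - x.2 : Int))) (b :: rest) rest).foldl
            pvGroupStep ([], some ((b.1 - a.1, b.2 - a.2), 1))).1)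
      = pvFlush ((List.zipWith (fun x y => ((y.1 - x.1 : Int), (y.2 - x.2 : Int))) (b :: rest) rest).foldl
            pvGroupStep ([], some ((b.1 - a.1, b.2 - a.2), 1))) from rfl]
    rw [this, hruns, recon_core rest a b]
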